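-- pv_equiv track=rewrite | github.com/mroumanos/geotime | geotime.py | buffer
-- ===== SOURCE A (Python) =====
-- def buffer(binary,precision_size,precision_chunk_size):
--     """
--     Buffers an input binary string to allow it to fit in a larger string
--     of 'precision_size' in length
--     """
--     chunk_count = int(precision_size/precision_chunk_size)
--     chunks = chunk(binary,chunk_count)
--     buffered_binary = ''
--     i = 0
--     for c in chunks:
--         buffered_binary += '0' * (precision_chunk_size - c) + binary[i:i+c]
--         i += c
--
--     return buffered_binary
--
-- def chunk(binary,chunk_count):
--     """
--     Chunks the input into approximately even-sized bins, returning
--     the bin sizes in the form of an integer array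
--     """
--     length = len(binary)
--     base_chunk_size = int(length / chunk_count)
--     chunks = [ base_chunk_size for i in range(chunk_count)]
--     xs = length - (base_chunk_size * chunk_count)
--     for i in range(xs): chunks[i] += 1
--
--     return chunks
-- ===== SOURCE B (Python) =====
-- def buffer(binary, precision_size, precision_chunk_size):
--     chunk_count = int(precision_size / precision_chunk_size)
--     if chunk_count <= 0:
--         return ''
--     base = int(len(binary) / chunk_count)
--     xs = len(binary) - base * chunk_count
--     big = base + 1
--     head, tail = binary[:xs * big], binary[xs * big:]
--     pad_big = '0' * (precision_chunk_size - big)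
--     pad_small = '0' * (precision_chunk_size - base)
--     return (''.join(pad_big + head[k * big:k * big + big] for k in range(xs))
--           + ''.join(pad_small + tail[k * base:k * base + base] for k in range(chunk_count - xs)))
-- ===== Notes on version B (the rewrite author's own statement) =====
-- stated objective: alternative
-- what changed: B replaces A's per-chunk size table and running-offset accumulation by a two-region decomposition: it splits the string once into a head of the xs oversized chunks and a tail of the remaining even chunks, precomputes the two padding strings once, and emits each region by uniform-stride slicing.
import Mathlib
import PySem

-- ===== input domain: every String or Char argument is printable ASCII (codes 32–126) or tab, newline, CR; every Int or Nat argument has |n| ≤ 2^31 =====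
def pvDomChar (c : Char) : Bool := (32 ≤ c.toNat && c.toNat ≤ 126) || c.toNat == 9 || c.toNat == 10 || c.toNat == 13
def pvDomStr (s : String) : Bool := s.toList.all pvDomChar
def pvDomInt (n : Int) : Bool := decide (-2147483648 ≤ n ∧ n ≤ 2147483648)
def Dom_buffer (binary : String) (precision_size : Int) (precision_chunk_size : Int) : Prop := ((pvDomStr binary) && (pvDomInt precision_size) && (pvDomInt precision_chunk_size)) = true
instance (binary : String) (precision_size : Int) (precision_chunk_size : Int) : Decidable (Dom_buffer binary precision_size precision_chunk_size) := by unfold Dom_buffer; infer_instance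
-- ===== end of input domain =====

-- B replaces A's per-chunk size table and running offset by a two-region decomposition:
-- split once into the head of the xs oversized chunks and the tail of even chunks, then
-- emit each region by uniform-stride slicing with a padding string computed once (objective: alternative).

-- ===== PORT A =====
-- port of the helper 'chunk' (the 'chunks[i] += 1' loop is ported with the total List.set;
-- Pre_buffer excludes exactly the inputs where Python's 'chunks[i] += 1' would raise IndexError)
def chunkA (binary : List Char) (chunk_count : Int) : List Int :=
  let length : Int := binary.length
  let base_chunk_size := PySem.Int.truncdiv length chunk_count
  let chunks := (PySem.List.pyRange 0 chunk_count 1).map (fun _ => base_chunk_size)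
  let xs := length - base_chunk_size * chunk_count
  (PySem.List.pyRange 0 xs 1).foldl
    (fun ch i => ch.set i.toNat (PySem.List.pyGetD ch i 0 + 1)) chunks

def buffer (binary : String) (precision_size : Int) (precision_chunk_size : Int) : String :=
  let b := binary.toList
  let chunk_count := PySem.Int.truncdiv precision_size precision_chunk_size
  let chunks := chunkA b chunk_count
  let st := chunks.foldl
    (fun (st : List Char × Int) c =>
      (st.1 ++ PySem.List.pyRepeat ['0'] (precision_chunk_size - c)
            ++ PySem.List.slice b (some st.2) (some (st.2 + c)),
       st.2 + c))
    ([], 0)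
  String.ofList st.1

-- ===== PORT B =====
-- ''.join over the generator is ported as flatten of the mapped list (join with empty separator)
def buffer_alt (binary : String) (precision_size : Int) (precision_chunk_size : Int) : String :=
  let b := binary.toList
  let chunk_count := PySem.Int.truncdiv precision_size precision_chunk_size
  if chunk_count ≤ 0 then "" else
  let base := PySem.Int.truncdiv (b.length : Int) chunk_count
  let xs := (b.length : Int) - base * chunk_count
  let big := base + 1
  let head := PySem.List.slice b none (some (xs * big))
  let tail := PySem.List.slice b (some (xs * big)) none
  let pad_big := List.replicate (precision_chunk_size - big).toNat '0'
  let pad_small := List.replicate (precision_chunk_size - base).toNat '0'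
  String.ofList
    (((List.range xs.toNat).map (fun (k : Nat) =>
        pad_big ++ PySem.List.slice head (some ((k : Int) * big)) (some ((k : Int) * big + big)))).flatten
     ++ ((List.range (chunk_count - xs).toNat).map (fun (k : Nat) =>
        pad_small ++ PySem.List.slice tail (some ((k : Int) * base)) (some ((k : Int) * base + base)))).flatten)

-- ===== PRECONDITION & SPEC =====
-- Pre_ excludes exactly the inputs where Python A raises: precision_chunk_size = 0 or
-- chunk_count = 0 (ZeroDivisionError), and chunk_count < 0 with a nonzero remainder
-- (chunk() builds an empty list but still runs 'chunks[i] += 1' → IndexError).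
def Pre_buffer (binary : String) (precision_size : Int) (precision_chunk_size : Int) : Prop :=
  precision_chunk_size ≠ 0 ∧
  PySem.Int.truncdiv precision_size precision_chunk_size ≠ 0 ∧
  (0 < PySem.Int.truncdiv precision_size precision_chunk_size ∨
    (binary.toList.length : Int) -
      PySem.Int.truncdiv (binary.toList.length : Int)
        (PySem.Int.truncdiv precision_size precision_chunk_size) *
      PySem.Int.truncdiv precision_size precision_chunk_size = 0)
instance (binary : String) (precision_size : Int) (precision_chunk_size : Int) : Decidable (Pre_buffer binary precision_size precision_chunk_size) := by unfold Pre_buffer; infer_instance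

def pvWitness_buffer : String × Int × Int := ("10110", 8, 4)

def Spec_buffer (binary : String) (precision_size : Int) (precision_chunk_size : Int) (out : String) : Prop := out = buffer_alt binary precision_size precision_chunk_size
instance (binary : String) (precision_size : Int) (precision_chunk_size : Int) (out : String) : Decidable (Spec_buffer binary precision_size precision_chunk_size out) := by unfold Spec_buffer; infer_instance

-- ===== CLAIM (what is proved, stated in full; the proofs are below) =====
def Claim_equal_buffer : Prop := ∀ (binary : String) (precision_size : Int) (precision_chunk_size : Int), Dom_buffer binary precision_size precision_chunk_size → Pre_buffer binary precision_size precision_chunk_size → Spec_buffer binary precision_size precision_chunk_size (buffer binary precision_size precision_chunk_size)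

-- ===== LEMMAS AND PROOFS =====

-- A's 'for i in range(xs): chunks[i] += 1' on the constant table, as a closed-form map
lemma incr_prefix (m N : Nat) (hm : m ≤ N) (base : Int) :
    (List.range m).foldl (fun ch k => ch.set k (ch.getD k 0 + 1))
      ((List.range N).map (fun _ => base))
    = (List.range N).map (fun (k : Nat) => base + if (k : Int) < (m : Int) then 1 else 0) := by
  induction m with
  | zero =>
    apply List.ext_getElem
    · simp
    · intro i h1 h2
      simp
  | succ m ih =>
    rw [List.range_succ, List.foldl_append, ih (by omega)]
    simp only [List.foldl_cons, List.foldl_nil]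
    apply List.ext_getElem
    · simp
    · intro i hi hi'
      simp only [List.length_set, List.length_map, List.length_range] at hi
      rcases eq_or_ne i m with rfl | hne
      · rw [List.getElem_set_self (by simp; omega)]
        have hget : ((List.range N).map (fun (k : Nat) => base + if (k : Int) < (i : Int) then 1 else 0)).getD i 0 = base := by
          rw [List.getD_eq_getElem?_getD]
          rw [List.getElem?_eq_getElem (by simp; omega)]
          simp
        rw [hget]
        simp only [List.getElem_map, List.getElem_range]
        split_ifs <;> omega
      · rw [List.getElem_set_ne (by omega)]
        simp only [List.getElem_map, List.getElem_range]
        split_ifs <;> first | rfl | omega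

-- A's buffering loop as a structural recursion over the size list at a running offset
def gA (b : List Char) (pcs : Int) : Int → List Int → List Char
  | _, [] => []
  | i, c :: cs =>
    List.replicate (pcs - c).toNat '0' ++ PySem.List.slice b (some i) (some (i + c))
      ++ gA b pcs (i + c) cs

lemma foldl_eq_gA (b : List Char) (pcs : Int) (cs : List Int) :
    ∀ (i : Int) (acc : List Char),
      (cs.foldl
        (fun (st : List Char × Int) c =>
          (st.1 ++ PySem.List.pyRepeat ['0'] (pcs - c)
                ++ PySem.List.slice b (some st.2) (some (st.2 + c)), st.2 + c))
        (acc, i)).1 = acc ++ gA b pcs i cs := by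
  induction cs with
  | nil => intro i acc; simp [gA]
  | cons c cs ih =>
    intro i acc
    rw [List.foldl_cons, ih, gA]
    simp [List.append_assoc]

-- the size table is xs copies of base+1 followed by the rest of base
lemma sizes_split (N x : Nat) (base : Int) (hx : x ≤ N) :
    (List.range N).map (fun (k : Nat) => base + if (k : Int) < (x : Int) then 1 else 0)
    = List.replicate x (base + 1) ++ List.replicate (N - x) base := by
  apply List.ext_getElem
  · simp; omega
  · intro i h1 h2
    simp only [List.getElem_map, List.getElem_range]
    by_cases hi : i < x
    · rw [List.getElem_append_left (by simpa using hi)]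
      rw [List.getElem_replicate, if_pos (by exact_mod_cast hi)]
    · rw [List.getElem_append_right (by simpa using hi)]
      rw [List.getElem_replicate, if_neg (by omega)]
      simp

lemma gA_append (b : List Char) (pcs : Int) (l1 l2 : List Int) :
    ∀ (i : Int), gA b pcs i (l1 ++ l2) = gA b pcs i l1 ++ gA b pcs (i + l1.sum) l2 := by
  induction l1 with
  | nil => intro i; simp [gA]
  | cons c t ih =>
    intro i
    rw [List.cons_append, gA, gA, ih (i + c)]
    rw [show i + c + t.sum = i + (c :: t).sum from by rw [List.sum_cons]; ring]
    simp [List.append_assoc]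

-- gA on a constant size list is the flatten of uniformly-strided padded slices
lemma gA_rep (b : List Char) (pcs c : Int) :
    ∀ (n : Nat) (i : Int),
      gA b pcs i (List.replicate n c)
      = ((List.range n).map (fun (k : Nat) => List.replicate (pcs - c).toNat '0'
          ++ PySem.List.slice b (some (i + (k : Int) * c)) (some (i + (k : Int) * c + c)))).flatten := by
  intro n
  induction n with
  | zero => intro i; simp [gA]
  | succ n ih =>
    intro i
    rw [List.replicate_succ, gA, List.range_succ_eq_map]
    simp only [List.map_cons, List.flatten_cons, List.map_map]
    congr 1
    · simp
    · rw [ih (i + c)]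
      congr 1
      apply List.map_congr_left
      intro k _
      simp only [Function.comp_apply]
      have hk : i + c + (k : Int) * c = i + ((Nat.succ k : Nat) : Int) * c := by push_cast; ring
      rw [hk]

-- a slice entirely inside a prefix equals the slice of the whole list
lemma slice_take (xs : List Char) (cut a c : Int) (h0 : 0 ≤ a) (hc : 0 ≤ c)
    (hend : a + c ≤ cut) :
    PySem.List.slice (xs.take cut.toNat) (some a) (some (a + c))
    = PySem.List.slice xs (some a) (some (a + c)) := by
  rw [PySem.List.slice_toNat _ h0 (by omega), PySem.List.slice_toNat _ h0 (by omega)]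
  rw [List.drop_take, List.take_take]
  congr 1
  omega

-- a slice of a suffix is the shifted slice of the whole list
lemma slice_drop (xs : List Char) (cut a c : Int) (hcut : 0 ≤ cut) (h0 : 0 ≤ a)
    (hc : 0 ≤ c) :
    PySem.List.slice (xs.drop cut.toNat) (some a) (some (a + c))
    = PySem.List.slice xs (some (cut + a)) (some (cut + a + c)) := by
  rw [PySem.List.slice_toNat _ h0 (by omega), PySem.List.slice_toNat _ (by omega) (by omega)]
  rw [List.drop_drop]
  have hb : (cut + a + c).toNat - (cut + a).toNat = (a + c).toNat - a.toNat := by omega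
  have ha : (cut + a).toNat = cut.toNat + a.toNat := by omega
  rw [hb, ha]

-- ===== VERDICT (by name: the statement is the Claim_ definition above) =====
theorem buffer_spec : Claim_equal_buffer := by
  intro binary ps pcs _ hpre
  obtain ⟨hpcs, hcc, hdisj⟩ := hpre
  simp only [Spec_buffer, buffer, buffer_alt, chunkA]
  set b := binary.toList with hbdef
  set cc := PySem.Int.truncdiv ps pcs with hccdef
  by_cases hpos : 0 < cc
  case neg =>
    have hle : cc ≤ 0 := by omega
    have hnil : PySem.List.pyRange 0 cc 1 = [] := PySem.List.pyRange_one_eq_nil hle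
    have hsetnil : ∀ (l : List Int),
        l.foldl (fun (ch : List Int) i => ch.set i.toNat (PySem.List.pyGetD ch i 0 + 1))
          ([] : List Int) = [] := by
      intro l; induction l with
      | nil => rfl
      | cons x t ih => simpa using ih
    simp only [hnil, List.map_nil, hsetnil, List.foldl_nil, if_pos hle]
  case pos =>
    rw [if_neg (by omega)]
    have hn0 : (0 : Int) ≤ (b.length : Int) := by positivity
    set n : Int := (b.length : Int) with hndef
    set base := PySem.Int.truncdiv n cc with hbase
    have hbase' : base = n / cc := Int.tdiv_eq_ediv_of_nonneg hn0
    set xs := n - base * cc with hxsdef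
    have hxsmod : xs = n % cc := by
      rw [hxsdef, hbase', Int.emod_def]; ring
    have hxs0 : 0 ≤ xs := by rw [hxsmod]; exact Int.emod_nonneg n (by omega)
    have hxslt : xs < cc := by rw [hxsmod]; exact Int.emod_lt_of_pos n hpos
    have hbase0 : 0 ≤ base := by rw [hbase']; exact Int.ediv_nonneg hn0 (by omega)
    set ccN := cc.toNat with hccN
    have hccNv : (ccN : Int) = cc := Int.toNat_of_nonneg (by omega)
    set xsN := xs.toNat with hxsN
    have hxsNv : (xsN : Int) = xs := Int.toNat_of_nonneg hxs0
    -- ---- A side: reduce to gA over the size table ----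
    have hrange : PySem.List.pyRange 0 cc 1 = (List.range ccN).map (fun (k : Nat) => (k : Int)) := by
      rw [PySem.List.pyRange_one]
      simp [hccN]
    have hrangexs : PySem.List.pyRange 0 xs 1 = (List.range xsN).map (fun (k : Nat) => (k : Int)) := by
      rw [PySem.List.pyRange_one]
      simp [hxsN]
    rw [hrange, hrangexs, List.map_map, List.foldl_map]
    have hfun : (fun (ch : List Int) (k : Nat) =>
          ch.set ((k : Int)).toNat (PySem.List.pyGetD ch ((k : Int)) 0 + 1))
        = fun (ch : List Int) (k : Nat) => ch.set k (ch.getD k 0 + 1) := by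
      funext ch k
      simp
    rw [hfun]
    have hconst : ((fun (_ : Int) => base) ∘ fun (k : Nat) => (k : Int)) = fun (_ : Nat) => base := rfl
    rw [hconst, incr_prefix xsN ccN (by omega) base]
    rw [foldl_eq_gA, List.nil_append]
    -- split the size table into the two constant regions
    rw [sizes_split ccN xsN base (by omega), gA_append, gA_rep, gA_rep]
    have hsum : (List.replicate xsN (base + 1)).sum = xs * (base + 1) := by
      rw [List.sum_replicate]
      rw [← hxsNv]
      simp
    rw [hsum]
    -- ---- B side: rewrite head/tail slices to slices of b ----
    have hbig0 : (0 : Int) ≤ base + 1 := by omega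
    have hcut0 : (0 : Int) ≤ xs * (base + 1) := mul_nonneg hxs0 hbig0
    have hcutle : xs * (base + 1) ≤ n := by
      have h1 : xs * (base + 1) = xs * base + xs := by ring
      have h2 : xs * base ≤ cc * base := mul_le_mul_of_nonneg_right (by omega) hbase0
      have : base * cc + xs = n := by omega
      nlinarith
    have hcnt : (cc - xs).toNat = ccN - xsN := by omega
    have hhead := PySem.List.slice_to b hcut0
    have htail := PySem.List.slice_from b hcut0
    simp only [hhead, htail, hcnt]
    congr 1
    congr 1
    -- head region
    · congr 1
      apply List.map_congr_left
      intro k hk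
      have hkx : k < xsN := List.mem_range.mp hk
      congr 1
      rw [slice_take b (xs * (base + 1)) ((k : Int) * (base + 1)) (base + 1)
            (mul_nonneg (by positivity) hbig0) hbig0
            (by
              have h1 : ((k : Int) + 1) * (base + 1) ≤ xs * (base + 1) := by
                apply mul_le_mul_of_nonneg_right _ hbig0
                have : (k : Int) + 1 ≤ (xsN : Int) := by exact_mod_cast hkx
                omega
              nlinarith [h1])]
      congr 1 <;> · congr 1; ring
    -- tail region
    · congr 1
      apply List.map_congr_left
      intro k hk
      congr 1
      rw [slice_drop b (xs * (base + 1)) ((k : Int) * base) base hcut0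
            (mul_nonneg (by positivity) hbase0) hbase0]
      congr 1 <;> · congr 1; ring
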